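-- pv_equiv track=rewrite | github.com/sogang-isds/Korean-MWPS | ai_challenge_2step_data/functions.py | func_findlargeordidx
-- ===== SOURCE A (Python) =====
-- def func_findlargeordidx(num_list,arg0):
--     listset = set(num_list)
--     sorted_list = sorted(listset, reverse=True)
--     x = sorted_list[arg0 - 1]
--     for i in range(len(num_list)):
--         if num_list[i] == x:
--             answer = i
--     result = answer
--     return result
-- ===== SOURCE B (Python) =====
-- def _select_rth_largest(vals, r):
--     # vals holds pairwise-distinct values; returns the value with exactly r greater ones
--     while True:
--         pivot = vals[len(vals) // 2]
--         highs = [v for v in vals if v > pivot]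
--         if r < len(highs):
--             vals = highs
--         elif r == len(highs):
--             return pivot
--         else:
--             r = r - len(highs) - 1
--             vals = [v for v in vals if v < pivot]
--
-- def func_findlargeordidx(num_list, arg0):
--     distinct = list(dict.fromkeys(num_list))
--     x = _select_rth_largest(distinct, arg0 - 1)
--     for i in range(len(num_list) - 1, -1, -1):
--         if num_list[i] == x:
--             return i
-- ===== Notes on version B (the rewrite author's own statement) =====
-- stated objective: alternative
-- what changed: B replaces set + full descending sort + forward last-match scan by an iterative middle-pivot quickselect for the (arg0-1)-th largest distinct value and a backward scan returning at the first match; Pre_ excludes arg0 outside 1..#distinct, where A's negative-index wraparound accidentally returns a value while B's quickselect raises IndexError.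
-- outside the precondition, e.g. on func_findlargeordidx([3, 1, 2], 0): A returns 1, B raises IndexError
import Mathlib
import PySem

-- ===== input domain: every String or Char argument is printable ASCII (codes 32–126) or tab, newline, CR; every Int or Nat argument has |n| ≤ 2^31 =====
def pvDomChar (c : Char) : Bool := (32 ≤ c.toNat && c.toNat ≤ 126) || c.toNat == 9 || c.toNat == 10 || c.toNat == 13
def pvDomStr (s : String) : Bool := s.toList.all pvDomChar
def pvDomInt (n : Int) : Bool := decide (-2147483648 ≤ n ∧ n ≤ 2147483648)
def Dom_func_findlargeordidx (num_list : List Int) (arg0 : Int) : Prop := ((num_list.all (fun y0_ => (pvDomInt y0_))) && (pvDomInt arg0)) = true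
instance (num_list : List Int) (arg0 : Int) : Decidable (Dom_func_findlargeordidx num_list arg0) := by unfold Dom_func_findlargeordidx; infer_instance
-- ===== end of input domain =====

-- B replaces set + full descending sort + forward last-match scan by an iterative middle-pivot
-- quickselect for the (arg0-1)-th largest distinct value plus a backward scan returning at the
-- first match (objective: alternative).

-- ===== PORT A =====
def func_findlargeordidx (num_list : List Int) (arg0 : Int) : Int :=
  let listset := PySem.Set.ofList num_list
  let sorted_list := PySem.List.sorted listset (fun x => x) true
  match PySem.List.pyGet? sorted_list (arg0 - 1) with
  | none => 0            -- IndexError; excluded by Pre_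
  | some x =>
    -- 'answer' starts unbound (NameError if never assigned); under Pre_ it is always assigned
    let answer : Option Int :=
      (PySem.List.pyRange 0 (num_list.length : Int) 1).foldl
        (fun answer i => if PySem.List.pyGetD num_list i 0 = x then some i else answer) none
    answer.getD 0

-- ===== PORT B =====
-- termination fact for the quickselect loop: filtering out the (middle) pivot shrinks the list
theorem filter_lt_of_pivot_false (v0 : Int) (rest : List Int) (p : Int → Bool)
    (hp : p ((v0 :: rest).getD ((v0 :: rest).length / 2) 0) = false) :
    ((v0 :: rest).filter p).length < (v0 :: rest).length := by
  rw [List.length_filter_lt_length_iff_exists]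
  refine ⟨(v0 :: rest).getD ((v0 :: rest).length / 2) 0, ?_, ne_true_of_eq_false hp⟩
  rw [List.getD_eq_getElem _ _ (Nat.div_lt_self (by simp) (by omega))]
  exact List.getElem_mem _

-- quickselect: the r-th largest among pairwise-distinct values (B's while loop as recursion)
def selectRthLargest (vals : List Int) (r : Int) : Int :=
  match vals with
  | [] => 0            -- vals[0] IndexError; unreachable from inputs admitted by Pre_
  | v0 :: rest =>
    let pivot := (v0 :: rest).getD ((v0 :: rest).length / 2) 0
    let highs := (v0 :: rest).filter (fun v => decide (pivot < v))
    if r < (highs.length : Int) then selectRthLargest highs r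
    else if r = (highs.length : Int) then pivot
    else selectRthLargest ((v0 :: rest).filter (fun v => decide (v < pivot))) (r - (highs.length : Int) - 1)
termination_by vals.length
decreasing_by
  · exact filter_lt_of_pivot_false _ _ _ (by simp)
  · exact filter_lt_of_pivot_false _ _ _ (by simp)

def func_findlargeordidx_alt (num_list : List Int) (arg0 : Int) : Int :=
  let distinct := PySem.List.dedup num_list
  let x := selectRthLargest distinct (arg0 - 1)
  match (PySem.List.pyRange ((num_list.length : Int) - 1) (-1) (-1)).find?
          (fun i => PySem.List.pyGetD num_list i 0 == x) with
  | some i => i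
  | none => 0        -- never happens under Pre_: x occurs in num_list

-- ===== PRECONDITION & SPEC =====
-- Pre_ excludes arg0 outside 1..#distinct: there A either raises IndexError (arg0 > d or
-- arg0 < 1-d) or returns a value only through Python's accidental negative-index wraparound
-- (1-d ≤ arg0 ≤ 0), where B's quickselect naturally raises IndexError.
def Pre_func_findlargeordidx (num_list : List Int) (arg0 : Int) : Prop :=
  1 ≤ arg0 ∧ arg0 ≤ ((PySem.List.dedup num_list).length : Int)
instance (num_list : List Int) (arg0 : Int) : Decidable (Pre_func_findlargeordidx num_list arg0) := by unfold Pre_func_findlargeordidx; infer_instance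
def pvWitness_func_findlargeordidx : List Int × Int := ([3, 1, 3, 2], 2)

def Spec_func_findlargeordidx (num_list : List Int) (arg0 : Int) (out : Int) : Prop := out = func_findlargeordidx_alt num_list arg0
instance (num_list : List Int) (arg0 : Int) (out : Int) : Decidable (Spec_func_findlargeordidx num_list arg0 out) := by unfold Spec_func_findlargeordidx; infer_instance

-- ===== CLAIM (what is proved, stated in full; the proofs are below) =====
def Claim_equal_func_findlargeordidx : Prop := ∀ (num_list : List Int) (arg0 : Int), Dom_func_findlargeordidx num_list arg0 → Pre_func_findlargeordidx num_list arg0 → Spec_func_findlargeordidx num_list arg0 (func_findlargeordidx num_list arg0)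

-- ===== LEMMAS AND PROOFS =====

-- A strictly decreasing list: the count of elements greater than the k-th one is exactly k.
theorem countP_gt_of_pairwise_gt (L : List Int) (hL : L.Pairwise (fun a b => b < a)) :
    ∀ (k : Nat) (hk : k < L.length), L.countP (fun w => decide (L[k] < w)) = k := by
  induction L with
  | nil => intro k hk; simp at hk
  | cons a t ih =>
    rw [List.pairwise_cons] at hL
    intro k hk
    cases k with
    | zero =>
      simp only [List.getElem_cons_zero, List.countP_cons]
      simp only [List.countP_eq_zero, decide_eq_true_eq, lt_self_iff_false, decide_false,
        Bool.false_eq_true, if_false, Nat.add_zero]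
      intro b hb
      exact not_lt.mpr (le_of_lt (hL.1 b hb))
    | succ k =>
      have hk' : k < t.length := by simpa using hk
      have hlt : t[k] < a := hL.1 _ (List.getElem_mem hk')
      have h2 := ih hL.2 k hk'
      simp only [List.getElem_cons_succ, List.countP_cons]
      simpa [hlt] using h2

-- in a duplicate-free list the non-greater part is a permutation of pivot :: smaller part
theorem partition_perm (l : List Int) (pivot : Int) (hl : l.Nodup) (hm : pivot ∈ l) :
    (l.filter (fun v => !decide (pivot < v))).Perm (pivot :: l.filter (fun v => decide (v < pivot))) := by
  have hm2 : pivot ∈ l.filter (fun v => !decide (pivot < v)) :=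
    List.mem_filter.mpr ⟨hm, by simp⟩
  have hnd2 : (l.filter (fun v => !decide (pivot < v))).Nodup := hl.filter _
  have hp := List.perm_cons_erase hm2
  rw [hnd2.erase_eq_filter pivot, List.filter_filter] at hp
  have hcongr : l.filter (fun a => (a != pivot) && !decide (pivot < a))
      = l.filter (fun v => decide (v < pivot)) := by
    apply List.filter_congr
    intro w _
    by_cases hlt : w < pivot
    · simp [hlt, ne_of_lt hlt, not_lt.mpr (le_of_lt hlt)]
    · by_cases heq : w = pivot
      · simp [heq]
      · simp [hlt, lt_of_le_of_ne (not_lt.mp hlt) (Ne.symm heq)]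
  rwa [hcongr] at hp

-- quickselect on a duplicate-free list returns a member whose count of greater elements is exactly r.
theorem select_spec : ∀ (n : Nat) (vals : List Int) (r : Int), vals.length ≤ n → vals.Nodup →
    0 ≤ r → r < (vals.length : Int) →
    selectRthLargest vals r ∈ vals ∧
      ((vals.countP (fun w => decide (selectRthLargest vals r < w)) : Int)) = r := by
  intro n
  induction n with
  | zero =>
    intro vals r hle _ hr0 hrlt
    interval_cases h : vals.length
    · omega
  | succ n ih =>
    intro vals r hle hnd hr0 hrlt
    match vals with
    | [] =>
      simp only [List.length_nil, Nat.cast_zero] at hrlt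
      exact absurd hr0 (by omega)
    | v0 :: rest =>
      set l : List Int := v0 :: rest with hldef
      set pivot : Int := l.getD (l.length / 2) 0 with hpivot
      have hpm : pivot ∈ l := by
        rw [hpivot, List.getD_eq_getElem _ _ (Nat.div_lt_self (by simp [hldef]) (by omega))]
        exact List.getElem_mem _
      have hpart := partition_perm l pivot hnd hpm
      have hlensum : l.length = (l.filter (fun v => decide (pivot < v))).length
          + (l.filter (fun v => decide (v < pivot))).length + 1 := by
        have h1 := (List.filter_append_perm (fun v => decide (pivot < v)) l).length_eq
        have h2 := hpart.length_eq
        rw [List.length_append] at h1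
        rw [List.length_cons] at h2
        omega
      have hppf1 : (fun v => decide (pivot < v)) ((v0 :: rest).getD ((v0 :: rest).length / 2) 0) = false := by
        rw [← hldef, ← hpivot]; simp
      have hppf2 : (fun v => decide (v < pivot)) ((v0 :: rest).getD ((v0 :: rest).length / 2) 0) = false := by
        rw [← hldef, ← hpivot]; simp
      have hfh : (l.filter (fun v => decide (pivot < v))).length ≤ n := by
        have h := filter_lt_of_pivot_false v0 rest (fun v => decide (pivot < v)) hppf1
        rw [← hldef] at h
        simp only [hldef, List.length_cons] at h hle ⊢
        omega
      have hfl2 : (l.filter (fun v => decide (v < pivot))).length ≤ n := by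
        have h := filter_lt_of_pivot_false v0 rest (fun v => decide (v < pivot)) hppf2
        rw [← hldef] at h
        simp only [hldef, List.length_cons] at h hle ⊢
        omega
      rw [selectRthLargest]
      simp only [← hldef, ← hpivot]
      by_cases h1 : r < ((l.filter (fun v => decide (pivot < v))).length : Int)
      · rw [if_pos h1]
        have ⟨hm, hc⟩ := ih (l.filter (fun v => decide (pivot < v))) r
          hfh (hnd.filter _) hr0 h1
        set x := selectRthLargest (l.filter (fun v => decide (pivot < v))) r with hx
        have hpx : pivot < x := of_decide_eq_true ((List.mem_filter.mp hm).2)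
        refine ⟨List.mem_of_mem_filter hm, ?_⟩
        have hcnt : l.countP (fun w => decide (x < w))
            = (l.filter (fun v => decide (pivot < v))).countP (fun w => decide (x < w)) := by
          rw [List.countP_filter]
          apply List.countP_congr
          intro w _
          by_cases hxw : x < w
          · simp [hxw, lt_trans hpx hxw]
          · simp [hxw]
        rw [hcnt]
        exact hc
      · rw [if_neg h1]
        by_cases h2 : r = ((l.filter (fun v => decide (pivot < v))).length : Int)
        · rw [if_pos h2]
          refine ⟨hpm, ?_⟩
          rw [List.countP_eq_length_filter, h2]
        · rw [if_neg h2]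
          have ⟨hm, hc⟩ := ih (l.filter (fun v => decide (v < pivot)))
            (r - ((l.filter (fun v => decide (pivot < v))).length : Int) - 1)
            hfl2 (hnd.filter _) (by omega) (by omega)
          set x := selectRthLargest (l.filter (fun v => decide (v < pivot)))
            (r - ((l.filter (fun v => decide (pivot < v))).length : Int) - 1) with hx
          have hxp : x < pivot := of_decide_eq_true ((List.mem_filter.mp hm).2)
          refine ⟨List.mem_of_mem_filter hm, ?_⟩
          have hsplitc : l.countP (fun w => decide (x < w))
              = (l.filter (fun v => decide (pivot < v))).countP (fun w => decide (x < w))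
              + (l.filter (fun v => !decide (pivot < v))).countP (fun w => decide (x < w)) := by
            rw [← (List.filter_append_perm (fun v => decide (pivot < v)) l).countP_eq
              (fun w => decide (x < w)), List.countP_append]
          have hhigh : (l.filter (fun v => decide (pivot < v))).countP (fun w => decide (x < w))
              = (l.filter (fun v => decide (pivot < v))).length := by
            rw [List.countP_eq_length]
            intro w hw
            have : pivot < w := of_decide_eq_true ((List.mem_filter.mp hw).2)
            simp [lt_trans hxp this]
          have hlow : (l.filter (fun v => !decide (pivot < v))).countP (fun w => decide (x < w))
              = (l.filter (fun v => decide (v < pivot))).countP (fun w => decide (x < w)) + 1 := by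
            rw [hpart.countP_eq, List.countP_cons]
            simp [hxp]
          rw [hsplitc, hhigh, hlow]
          omega

-- A's forward last-match fold over range(n) equals B's backward first-match search.
theorem last_match_eq (xs : List Int) (x : Int) : ∀ (n : Nat),
    (PySem.List.pyRange 0 (n : Int) 1).foldl
        (fun answer i => if PySem.List.pyGetD xs i 0 = x then some i else answer) none
      = (PySem.List.pyRange ((n : Int) - 1) (-1) (-1)).find?
          (fun i => PySem.List.pyGetD xs i 0 == x) := by
  intro n
  induction n with
  | zero => simp [PySem.List.pyRange_one_eq_nil, PySem.List.pyRange_neg_one_eq_nil]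
  | succ n ih =>
    have h1 : PySem.List.pyRange 0 ((n : Int) + 1) 1
        = PySem.List.pyRange 0 (n : Int) 1 ++ [(n : Int)] := by
      exact PySem.List.pyRange_one_succ_right (by exact_mod_cast Nat.zero_le n)
    have h2 : PySem.List.pyRange ((n : Int) + 1 - 1) (-1) (-1)
        = (n : Int) :: PySem.List.pyRange ((n : Int) - 1) (-1) (-1) := by
      have : ((n : Int) + 1 - 1) = (n : Int) := by ring
      rw [this, PySem.List.pyRange_neg_one_cons (by omega)]
    push_cast
    rw [h1, h2, List.foldl_append, List.find?_cons]
    by_cases h : PySem.List.pyGetD xs (n : Int) 0 = x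
    · simp [h]
    · simp only [List.foldl_cons, List.foldl_nil, h, if_false, ih]
      have : (PySem.List.pyGetD xs (n : Int) 0 == x) = false := by
        simpa using h
      rw [this]

theorem func_findlargeordidx_spec : Claim_equal_func_findlargeordidx := by
  intro num_list arg0 _ hp
  unfold Pre_func_findlargeordidx at hp
  unfold Spec_func_findlargeordidx func_findlargeordidx func_findlargeordidx_alt
  have hSd : PySem.List.dedup num_list = PySem.Set.ofList num_list := by simp
  set S : List Int := PySem.Set.ofList num_list with hSdef
  rw [hSd] at hp
  have hSnodup : S.Nodup := PySem.Set.nodup_ofList num_list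
  set L : List Int := PySem.List.sorted S (fun x => x) true with hLdef
  have hperm : L.Perm S := PySem.List.sorted_perm S (fun x => x) true
  have hlen : L.length = S.length := hperm.length_eq
  have hLnodup : L.Nodup := hperm.nodup_iff.mpr hSnodup
  have hpw : L.Pairwise (fun a b => b < a) := by
    have hle : L.Pairwise (fun a b => b ≤ a) := by
      have := PySem.List.sorted_pairwise_rev S (fun x => x)
      simpa using this
    exact (hle.and hLnodup).imp (fun h => lt_of_le_of_ne h.1 h.2.symm)
  set r : Int := arg0 - 1 with hrdef
  have hr0 : 0 ≤ r := by omega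
  have hrlt : r < (S.length : Int) := by omega
  set k : Nat := r.toNat with hkdef
  clear_value S L
  have hkL : k < L.length := by omega
  have hkr : (k : Int) = r := by omega
  -- A's indexing: sorted_list[arg0 - 1] = L[k]
  have hget : PySem.List.pyGet? L (arg0 - 1) = some (L[k]'hkL) := by
    have hidx : (arg0 - 1).toNat = k := by omega
    rw [PySem.List.pyGet?_of_nonneg _ (by omega), hidx]
    exact List.getElem?_eq_getElem hkL
  set x : Int := L[k]'hkL with hxdef
  -- B's selection finds the same value
  have hcount : L.countP (fun w => decide (x < w)) = k :=
    countP_gt_of_pairwise_gt L hpw k hkL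
  obtain ⟨hselm, hselc⟩ := select_spec S.length S r (le_refl _) hSnodup hr0 hrlt
  have hxeq : selectRthLargest S r = x := by
    obtain ⟨j, hj, hyj⟩ := List.mem_iff_getElem.mp (hperm.mem_iff.mpr hselm)
    have hcj : L.countP (fun w => decide (selectRthLargest S r < w)) = j := by
      have := countP_gt_of_pairwise_gt L hpw j hj
      rw [hyj] at this
      exact this
    rw [← hperm.countP_eq, hcj] at hselc
    have hjk : j = k := by omega
    subst hjk
    rw [← hyj]
  -- both scans agree
  have hscan := last_match_eq num_list x num_list.length
  have hget' : PySem.List.pyGet? L r = some x := by rw [hrdef]; exact hget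
  simp only [hSd, ← hLdef, hget', hxeq, hscan]
  cases hres : (PySem.List.pyRange ((num_list.length : Int) - 1) (-1) (-1)).find?
      (fun i => PySem.List.pyGetD num_list i 0 == x) with
  | none => simp
  | some i => simp
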